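-- pv_equiv track=rewrite | github.com/PriyavKaneria/profile-generator | generate_cv_profile.py | _format_skills_list
-- ===== SOURCE A (Python) =====
-- from typing import Dict, Any, List, Optional
--
-- def _format_skills_list(skills: List[str]) -> str:
--     """Format skills as markdown list"""
--     if not skills:
--         return "- No skills data available"
--
--     # Group skills by category (simple heuristic)
--     categories = {
--         'Languages': [],
--         'Frameworks': [],
--         'Tools': [],
--         'Other': []
--     }
--
--     frameworks = {'Django', 'Flask', 'FastAPI', 'React', 'Vue.js', 'Angular', 'Express.js', 'Svelte'}
--     languages = {'Python', 'JavaScript', 'TypeScript', 'Java', 'C++', 'C', 'C#', 'PHP', 'Ruby', 'Go', 'Rust'}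
--     tools = {'Git', 'Docker', 'AWS', 'Linux', 'SQL', 'MongoDB', 'PostgreSQL'}
--
--     for skill in skills:
--         if skill in languages:
--             categories['Languages'].append(skill)
--         elif skill in frameworks:
--             categories['Frameworks'].append(skill)
--         elif skill in tools:
--             categories['Tools'].append(skill)
--         else:
--             categories['Other'].append(skill)
--
--     result = []
--     for category, items in categories.items():
--         if items:
--             result.append(f"- **{category}:** {', '.join(items)}")
--
--     return '\n'.join(result)
-- ===== SOURCE B (Python) =====
-- def _format_skills_list(skills):
--     """Format skills as markdown list"""
--     if not skills:
--         return "- No skills data available"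
--
--     languages = {'Python', 'JavaScript', 'TypeScript', 'Java', 'C++', 'C', 'C#', 'PHP', 'Ruby', 'Go', 'Rust'}
--     frameworks = {'Django', 'Flask', 'FastAPI', 'React', 'Vue.js', 'Angular', 'Express.js', 'Svelte'}
--     tools = {'Git', 'Docker', 'AWS', 'Linux', 'SQL', 'MongoDB', 'PostgreSQL'}
--
--     groups = [
--         ('Languages', [s for s in skills if s in languages]),
--         ('Frameworks', [s for s in skills if s in frameworks]),
--         ('Tools', [s for s in skills if s in tools]),
--         ('Other', [s for s in skills
--                    if s not in languages and s not in frameworks and s not in tools]),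
--     ]
--     return '\n'.join(f"- **{name}:** {', '.join(items)}"
--                      for name, items in groups if items)
-- ===== Notes on version B (the rewrite author's own statement) =====
-- stated objective: alternative
-- what changed: Replaces the single classifying pass that appends each skill into a mutable category dict with one direct filter of `skills` per category (Other = in none of the three sets), then formats the non-empty groups in the fixed order.
import Mathlib
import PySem

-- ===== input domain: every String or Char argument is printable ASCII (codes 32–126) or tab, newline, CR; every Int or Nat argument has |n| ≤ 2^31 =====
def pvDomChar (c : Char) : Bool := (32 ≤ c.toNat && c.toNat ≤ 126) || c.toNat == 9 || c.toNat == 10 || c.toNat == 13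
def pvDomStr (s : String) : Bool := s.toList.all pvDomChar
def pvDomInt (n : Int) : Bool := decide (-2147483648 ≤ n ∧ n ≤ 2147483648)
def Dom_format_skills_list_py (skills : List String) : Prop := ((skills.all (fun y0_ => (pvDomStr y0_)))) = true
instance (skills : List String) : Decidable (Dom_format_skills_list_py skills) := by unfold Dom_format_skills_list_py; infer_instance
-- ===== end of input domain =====

-- B replaces A's single classifying pass into a mutable category dict by one direct filter per category (alternative decomposition, same cost).

-- ===== PORT A =====
def pvAFrameworks : PySem.Set String := PySem.Set.ofList ["Django", "Flask", "FastAPI", "React", "Vue.js", "Angular", "Express.js", "Svelte"]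
def pvALanguages : PySem.Set String := PySem.Set.ofList ["Python", "JavaScript", "TypeScript", "Java", "C++", "C", "C#", "PHP", "Ruby", "Go", "Rust"]
def pvATools : PySem.Set String := PySem.Set.ofList ["Git", "Docker", "AWS", "Linux", "SQL", "MongoDB", "PostgreSQL"]

-- the categories dict has four fixed literal keys, so it is modelled as a 4-tuple of
-- the four value lists (in the dict's insertion order Languages, Frameworks, Tools, Other)
def format_skills_list_py (skills : List String) : String :=
  if skills = [] then "- No skills data available"
  else
    let cats : List String × List String × List String × List String :=
      skills.foldl (fun c skill =>
        if PySem.Set.contains pvALanguages skill then (c.1 ++ [skill], c.2.1, c.2.2.1, c.2.2.2)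
        else if PySem.Set.contains pvAFrameworks skill then (c.1, c.2.1 ++ [skill], c.2.2.1, c.2.2.2)
        else if PySem.Set.contains pvATools skill then (c.1, c.2.1, c.2.2.1 ++ [skill], c.2.2.2)
        else (c.1, c.2.1, c.2.2.1, c.2.2.2 ++ [skill])) ([], [], [], [])
    let result : List String :=
      [("Languages", cats.1), ("Frameworks", cats.2.1), ("Tools", cats.2.2.1), ("Other", cats.2.2.2)].foldl
        (fun r p => if p.2 ≠ [] then r ++ ["- **" ++ p.1 ++ ":** " ++ PySem.Str.join ", " p.2] else r) []
    PySem.Str.join "\n" result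

-- ===== PORT B =====
def pvBLanguages : PySem.Set String := PySem.Set.ofList ["Python", "JavaScript", "TypeScript", "Java", "C++", "C", "C#", "PHP", "Ruby", "Go", "Rust"]
def pvBFrameworks : PySem.Set String := PySem.Set.ofList ["Django", "Flask", "FastAPI", "React", "Vue.js", "Angular", "Express.js", "Svelte"]
def pvBTools : PySem.Set String := PySem.Set.ofList ["Git", "Docker", "AWS", "Linux", "SQL", "MongoDB", "PostgreSQL"]

def format_skills_list_py_alt (skills : List String) : String :=
  if skills = [] then "- No skills data available"
  else
    let groups : List (String × List String) :=
      [("Languages", skills.filter (fun s => PySem.Set.contains pvBLanguages s)),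
       ("Frameworks", skills.filter (fun s => PySem.Set.contains pvBFrameworks s)),
       ("Tools", skills.filter (fun s => PySem.Set.contains pvBTools s)),
       ("Other", skills.filter (fun s =>
          ¬ PySem.Set.contains pvBLanguages s ∧ ¬ PySem.Set.contains pvBFrameworks s ∧ ¬ PySem.Set.contains pvBTools s))]
    PySem.Str.join "\n"
      ((groups.filter (fun g => g.2 ≠ [])).map
        (fun g => "- **" ++ g.1 ++ ":** " ++ PySem.Str.join ", " g.2))

-- ===== PRECONDITION & SPEC =====
def Spec_format_skills_list_py (skills : List String) (out : String) : Prop := out = format_skills_list_py_alt skills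
instance (skills : List String) (out : String) : Decidable (Spec_format_skills_list_py skills out) := by unfold Spec_format_skills_list_py; infer_instance

-- ===== CLAIM (what is proved, stated in full; the proofs are below) =====
def Claim_equal_format_skills_list_py : Prop := ∀ (skills : List String), Dom_format_skills_list_py skills → Spec_format_skills_list_py skills (format_skills_list_py skills)

-- ===== LEMMAS AND PROOFS =====

-- the three literal sets are pairwise disjoint, so B's direct filters agree with A's elif chain
lemma pvFw_not_lang (s : String) (h : PySem.Set.contains pvAFrameworks s = true) :
    PySem.Set.contains pvALanguages s = false := by
  rw [PySem.Set.contains_iff] at h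
  rw [show pvAFrameworks = ["Django", "Flask", "FastAPI", "React", "Vue.js", "Angular", "Express.js", "Svelte"] from by decide] at h
  simp only [List.mem_cons, List.not_mem_nil, or_false] at h
  rcases h with rfl | rfl | rfl | rfl | rfl | rfl | rfl | rfl <;> decide

lemma pvTool_not_lang (s : String) (h : PySem.Set.contains pvATools s = true) :
    PySem.Set.contains pvALanguages s = false := by
  rw [PySem.Set.contains_iff] at h
  rw [show pvATools = ["Git", "Docker", "AWS", "Linux", "SQL", "MongoDB", "PostgreSQL"] from by decide] at h
  simp only [List.mem_cons, List.not_mem_nil, or_false] at h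
  rcases h with rfl | rfl | rfl | rfl | rfl | rfl | rfl <;> decide

lemma pvTool_not_fw (s : String) (h : PySem.Set.contains pvATools s = true) :
    PySem.Set.contains pvAFrameworks s = false := by
  rw [PySem.Set.contains_iff] at h
  rw [show pvATools = ["Git", "Docker", "AWS", "Linux", "SQL", "MongoDB", "PostgreSQL"] from by decide] at h
  simp only [List.mem_cons, List.not_mem_nil, or_false] at h
  rcases h with rfl | rfl | rfl | rfl | rfl | rfl | rfl <;> decide

lemma pvNotMem (s : PySem.Set String) (x : String) (h : PySem.Set.contains s x = false) : x ∉ s := by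
  simp only [← PySem.Set.contains_iff, h]
  exact (by simp)

-- A's classifying fold computes exactly the four filters, appended to the accumulators
lemma pvClassify (skills : List String) (l f t o : List String) :
    skills.foldl (fun c skill =>
        if PySem.Set.contains pvALanguages skill then (c.1 ++ [skill], c.2.1, c.2.2.1, c.2.2.2)
        else if PySem.Set.contains pvAFrameworks skill then (c.1, c.2.1 ++ [skill], c.2.2.1, c.2.2.2)
        else if PySem.Set.contains pvATools skill then (c.1, c.2.1, c.2.2.1 ++ [skill], c.2.2.2)
        else (c.1, c.2.1, c.2.2.1, c.2.2.2 ++ [skill])) (l, f, t, o)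
    = (l ++ skills.filter (fun s => PySem.Set.contains pvALanguages s),
       f ++ skills.filter (fun s => PySem.Set.contains pvAFrameworks s),
       t ++ skills.filter (fun s => PySem.Set.contains pvATools s),
       o ++ skills.filter (fun s =>
          ¬ PySem.Set.contains pvALanguages s ∧ ¬ PySem.Set.contains pvAFrameworks s ∧ ¬ PySem.Set.contains pvATools s)) := by
  induction skills generalizing l f t o with
  | nil => simp
  | cons x xs ih =>
    by_cases hlc : PySem.Set.contains pvALanguages x = true
    · have hfc : PySem.Set.contains pvAFrameworks x = false := by
        cases hF : PySem.Set.contains pvAFrameworks x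
        · rfl
        · simp only [pvFw_not_lang x hF, Bool.false_eq_true] at hlc
      have htc : PySem.Set.contains pvATools x = false := by
        cases hT : PySem.Set.contains pvATools x
        · rfl
        · simp only [pvTool_not_lang x hT, Bool.false_eq_true] at hlc
      have hl' := (PySem.Set.contains_iff pvALanguages x).mp hlc
      have hf' := pvNotMem _ _ hfc
      have ht' := pvNotMem _ _ htc
      rw [List.foldl_cons, if_pos hlc, ih]
      simp [hl', hf', ht', List.append_assoc]
    · rw [Bool.not_eq_true] at hlc
      by_cases hfc : PySem.Set.contains pvAFrameworks x = true
      · have htc : PySem.Set.contains pvATools x = false := by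
          cases hT : PySem.Set.contains pvATools x
          · rfl
          · simp only [pvTool_not_fw x hT, Bool.false_eq_true] at hfc
        have hl' := pvNotMem _ _ hlc
        have hf' := (PySem.Set.contains_iff pvAFrameworks x).mp hfc
        have ht' := pvNotMem _ _ htc
        rw [List.foldl_cons, if_neg (by simp only [hlc]; decide), if_pos hfc, ih]
        simp [hl', hf', ht', List.append_assoc]
      · rw [Bool.not_eq_true] at hfc
        by_cases htc : PySem.Set.contains pvATools x = true
        · have hl' := pvNotMem _ _ hlc
          have hf' := pvNotMem _ _ hfc
          have ht' := (PySem.Set.contains_iff pvATools x).mp htc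
          rw [List.foldl_cons, if_neg (by simp only [hlc]; decide), if_neg (by simp only [hfc]; decide), if_pos htc, ih]
          simp [hl', hf', ht', List.append_assoc]
        · rw [Bool.not_eq_true] at htc
          have hl' := pvNotMem _ _ hlc
          have hf' := pvNotMem _ _ hfc
          have ht' := pvNotMem _ _ htc
          rw [List.foldl_cons, if_neg (by simp only [hlc]; decide), if_neg (by simp only [hfc]; decide), if_neg (by simp only [htc]; decide), ih]
          simp [hl', hf', ht', List.append_assoc]

-- A's conditional-append loop over the four (name, items) pairs is exactly B's filter-then-map
lemma pvAssemble (fmt : String × List String → String) (nL nF nT nO : String) (L F T O : List String) :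
    ([(nL, L), (nF, F), (nT, T), (nO, O)].foldl
        (fun r p => if p.2 ≠ [] then r ++ [fmt p] else r) [])
    = ([(nL, L), (nF, F), (nT, T), (nO, O)].filter (fun g => g.2 ≠ [])).map fmt := by
  by_cases h1 : L = [] <;> by_cases h2 : F = [] <;> by_cases h3 : T = [] <;> by_cases h4 : O = [] <;>
    simp [h1, h2, h3, h4]

-- ===== VERDICT (by name: the statement is the Claim_ definition above) =====
theorem format_skills_list_py_spec : Claim_equal_format_skills_list_py := by
  intro skills _
  unfold Spec_format_skills_list_py format_skills_list_py format_skills_list_py_alt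
  by_cases hnil : skills = []
  · simp [hnil]
  · have hL : pvBLanguages = pvALanguages := by decide
    have hF : pvBFrameworks = pvAFrameworks := by decide
    have hT : pvBTools = pvATools := by decide
    simp only [hnil, ite_false, hL, hF, hT]
    rw [pvClassify skills [] [] [] []]
    simp only [List.nil_append]
    rw [pvAssemble]
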